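-- pv_equiv track=rewrite | github.com/raybuhr/adventofcode | 2020/07/run.py | find_all_colors
-- ===== SOURCE A (Python) =====
-- def find_color(color, bags, parsed_data):
--     found = [(i, d) for i, d in enumerate(parsed_data) if color in d and not d.startswith(color)]
--     cols = []
--     for i, f in found:
--         bag = bags[i]
--         cols += list(bag.keys())
--     return cols
--
-- def find_all_colors(bags, parsed_data):
--     seen = set(find_color("shiny gold", bags, parsed_data))
--     new_seen = set()
--     done = False
--     while not done:
--         for s in seen:
--             new_seen.update(set(find_color(s, bags, parsed_data)))
--         new_seen = new_seen - seen
--         if len(new_seen) > 0: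
--             seen.update(new_seen)
--         else:
--             done = True
--     return seen
-- ===== SOURCE B (Python) =====
-- def find_all_colors(bags, parsed_data):
--     # BFS over a frontier: each color's containers are looked up once,
--     # instead of re-scanning every seen color on every round.
--     def neighbors(color):
--         return [k for i, d in enumerate(parsed_data)
--                 if color in d and not d.startswith(color)
--                 for k in bags[i].keys()]
--     seen = set()
--     frontier = ["shiny gold"]
--     while frontier:
--         nxt = []
--         for c in frontier:
--             for k in neighbors(c):
--                 if k not in seen:
--                     seen.add(k)
--                     nxt.append(k)
--         frontier = nxt
--     return seen
-- ===== Notes on version B (the rewrite author's own statement) =====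
-- stated objective: alternative
-- what changed: A re-runs find_color for EVERY already-seen color on every round of its fixpoint loop; B does a single BFS that expands each color exactly once via a frontier list.
-- outside the precondition, e.g. on find_all_colors([{'red': 1}], ['a shiny gold', 'zz']): A returns {'red'}, B returns {'red'}
import Mathlib
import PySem

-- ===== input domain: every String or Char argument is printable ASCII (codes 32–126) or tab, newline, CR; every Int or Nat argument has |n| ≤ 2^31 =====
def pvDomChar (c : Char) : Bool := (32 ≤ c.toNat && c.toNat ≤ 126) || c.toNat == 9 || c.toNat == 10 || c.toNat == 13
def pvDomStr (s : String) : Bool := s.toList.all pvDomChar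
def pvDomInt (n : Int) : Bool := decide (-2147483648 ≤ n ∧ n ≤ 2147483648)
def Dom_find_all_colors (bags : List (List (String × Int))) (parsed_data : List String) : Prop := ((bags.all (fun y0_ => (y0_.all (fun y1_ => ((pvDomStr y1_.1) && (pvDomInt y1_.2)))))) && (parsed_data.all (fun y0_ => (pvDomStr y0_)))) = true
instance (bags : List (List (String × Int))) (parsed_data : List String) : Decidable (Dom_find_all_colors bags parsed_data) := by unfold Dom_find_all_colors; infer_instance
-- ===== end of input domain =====

-- B replaces A's "re-expand every seen color each round" fixpoint loop by a single frontier BFS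
-- that expands each color once (a different traversal of the same reachability closure).

set_option maxHeartbeats 1000000


-- ===== PORT A =====
-- 'color in d and not d.startswith(color)'
def fcMatch (color d : String) : Bool :=
  PySem.Str.isIn color d && !(PySem.Str.startswith d color)

-- list(bags[i].keys()); bags[i] via pyGet?, made total with getD [] identically in both ports
-- (where Python would raise IndexError here, BOTH Pythons raise; the ports agree everywhere)
def bagKeys (bags : List (List (String × Int))) (i : Int) : List String :=
  (PySem.Dict.ofList ((PySem.List.pyGet? bags i).getD [])).keys

-- port of A's find_color
def find_color (color : String) (bags : List (List (String × Int))) (parsed_data : List String) : List String :=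
  let found := (PySem.List.enumerate parsed_data).filter (fun p => fcMatch color p.2)
  found.foldl (fun cols p => cols ++ bagKeys bags p.1) []

-- A's 'while not done' loop; fuel is a generous bound on its iteration count
-- (every non-final round adds at least one bag key to seen)
def aLoop (bags : List (List (String × Int))) (parsed_data : List String) :
    PySem.Set String → PySem.Set String → Nat → PySem.Set String
  | seen, _, 0 => seen
  | seen, new_seen, fuel+1 =>
      let ns := seen.foldl (fun a s => PySem.Set.update a (PySem.Set.ofList (find_color s bags parsed_data))) new_seen
      let ns2 := PySem.Set.diff ns seen
      if ns2.length > 0 then aLoop bags parsed_data (PySem.Set.update seen ns2) ns2 fuel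
      else seen

def find_all_colors (bags : List (List (String × Int))) (parsed_data : List String) : List String :=
  let seen := PySem.Set.ofList (find_color "shiny gold" bags parsed_data)
  aLoop bags parsed_data seen PySem.Set.empty
    ((bags.flatMap (fun b => (PySem.Dict.ofList b).keys)).length + 2)

-- ===== PORT B =====
-- Source B's neighbors comprehension
def neighbors_alt (bags : List (List (String × Int))) (parsed_data : List String) (color : String) : List String :=
  ((PySem.List.enumerate parsed_data).filter (fun p => fcMatch color p.2)).flatMap
    (fun p => bagKeys bags p.1)

-- Source B's 'while frontier' BFS loop (same generous fuel bound, one extra round for initialization)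
def bfsLoop (bags : List (List (String × Int))) (parsed_data : List String) :
    PySem.Set String → List String → Nat → PySem.Set String
  | seen, [], _ => seen
  | seen, _, 0 => seen
  | seen, frontier, fuel+1 =>
      let st := frontier.foldl (fun st c =>
        (neighbors_alt bags parsed_data c).foldl
          (fun (st : PySem.Set String × List String) k =>
            if st.1.contains k then st else (st.1 ++ [k], st.2 ++ [k])) st) (seen, [])
      bfsLoop bags parsed_data st.1 st.2 fuel

def find_all_colors_alt (bags : List (List (String × Int))) (parsed_data : List String) : List String :=
  bfsLoop bags parsed_data PySem.Set.empty ["shiny gold"]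
    ((bags.flatMap (fun b => (PySem.Dict.ofList b).keys)).length + 3)

-- ===== PRECONDITION & SPEC =====
-- Pre_ excludes inputs that have more parsed lines than bags while some line matches "shiny gold":
-- on those the search can index bags out of range (IndexError in both A and B); a few such inputs
-- still return (the out-of-range lines are never reached), an accident of reachability excluded with them.
def Pre_find_all_colors (bags : List (List (String × Int))) (parsed_data : List String) : Prop :=
  parsed_data.length ≤ bags.length ∨
    ∀ d ∈ parsed_data, (PySem.Str.isIn "shiny gold" d && !(PySem.Str.startswith d "shiny gold")) = false
instance (bags : List (List (String × Int))) (parsed_data : List String) : Decidable (Pre_find_all_colors bags parsed_data) := by unfold Pre_find_all_colors; infer_instance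

def pvWitness_find_all_colors : (List (List (String × Int))) × List String :=
  ([[("bright white", 1)]], ["bright white bags contain 1 shiny gold bag."])

def Spec_find_all_colors (bags : List (List (String × Int))) (parsed_data : List String) (out : List String) : Prop := out = find_all_colors_alt bags parsed_data
instance (bags : List (List (String × Int))) (parsed_data : List String) (out : List String) : Decidable (Spec_find_all_colors bags parsed_data out) := by unfold Spec_find_all_colors; infer_instance

-- ===== CLAIM (what is proved, stated in full; the proofs are below) =====
def Claim_equal_find_all_colors : Prop := ∀ (bags : List (List (String × Int))) (parsed_data : List String), Dom_find_all_colors bags parsed_data → Pre_find_all_colors bags parsed_data → Spec_find_all_colors bags parsed_data (find_all_colors bags parsed_data)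

-- ===== LEMMAS AND PROOFS =====

theorem containsT {l : List String} {x : String} (h : x ∈ l) : PySem.Set.contains l x = true := by
  simpa [PySem.Set.contains_iff] using h

theorem containsF {l : List String} {x : String} (h : x ∉ l) : PySem.Set.contains l x = false := by
  cases hcl : PySem.Set.contains l x
  · rfl
  · simp [PySem.Set.contains_iff] at hcl
    exact absurd hcl h

-- the two one-step neighbour functions agree
theorem neighbors_alt_eq (bags : List (List (String × Int))) (pd : List String) (c : String) :
    neighbors_alt bags pd c = find_color c bags pd := by
  simp only [neighbors_alt, find_color]
  rw [PySem.List.foldl_append_eq_flatMap, List.nil_append]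

-- folding over a flatMap is the nested fold
theorem foldl_flatMap' {α β γ : Type} (l : List α) (f : α → List β) (g : γ → β → γ) (init : γ) :
    (l.flatMap f).foldl g init = l.foldl (fun acc a => (f a).foldl g acc) init := by
  induction l generalizing init with
  | nil => simp
  | cons x xs ih => simp [List.foldl_append, ih]

-- updating with a deduplicated list is updating with the list
theorem update_ofList (a : PySem.Set String) (l : List String) :
    PySem.Set.update a (PySem.Set.ofList l) = PySem.Set.update a l := by
  rw [PySem.Set.update_eq_append_filter, PySem.Set.update_eq_append_filter,
    PySem.Set.ofList_ofList]

-- B's inner double fold: first component is Set.update, second appends exactly the new part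
theorem bfs_inner_fold (xs : List String) (s t : List String) :
    xs.foldl (fun (st : PySem.Set String × List String) k =>
        if st.1.contains k then st else (st.1 ++ [k], st.2 ++ [k])) (s, t)
      = (PySem.Set.update s xs, t ++ (PySem.Set.update s xs).drop s.length) := by
  induction xs generalizing s t with
  | nil => simp [PySem.Set.update_nil, List.drop_length]
  | cons x xs ih =>
    rw [List.foldl_cons]
    by_cases hx : x ∈ s
    · have hc : PySem.Set.contains s x = true := containsT hx
      rw [if_pos hc, ih s t, PySem.Set.update_cons, PySem.Set.add_of_mem hx]
    · have hc : ¬ (PySem.Set.contains s x = true) := by simpa using hx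
      rw [if_neg hc, ih (s ++ [x]) (t ++ [x]), PySem.Set.update_cons,
        PySem.Set.add_of_not_mem hx]
      rw [PySem.Set.update_eq_append_filter (s ++ [x]) xs]
      simp only [Prod.mk.injEq, true_and]
      rw [List.drop_left, List.append_assoc s [x], List.drop_left, List.append_assoc]

-- one round of B's loop, uniformly (for an empty frontier both sides are 'seen')
theorem bfs_round (bags : List (List (String × Int))) (pd : List String)
    (seen : PySem.Set String) (fr : List String) (fuel : Nat) :
    bfsLoop bags pd seen fr (fuel+1)
      = bfsLoop bags pd
          (PySem.Set.update seen (fr.flatMap (fun s => find_color s bags pd)))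
          ((PySem.Set.update seen (fr.flatMap (fun s => find_color s bags pd))).drop seen.length)
          fuel := by
  cases fr with
  | nil => simp [bfsLoop, PySem.Set.update_nil, List.drop_length]
  | cons c fr' =>
    rw [bfsLoop]
    simp only [neighbors_alt_eq]
    rw [← foldl_flatMap', bfs_inner_fold]
    all_goals simp

-- A's round of updates over seen is one Set.update with the concatenated neighbour lists
theorem aLoop_fold_update (bags : List (List (String × Int))) (pd : List String)
    (seen ns : PySem.Set String) :
    seen.foldl (fun a s => PySem.Set.update a (PySem.Set.ofList (find_color s bags pd))) ns
      = PySem.Set.update ns (seen.flatMap (fun s => find_color s bags pd)) := by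
  induction seen generalizing ns with
  | nil => simp [PySem.Set.update_nil]
  | cons s seen ih =>
    rw [List.foldl_cons, ih, List.flatMap_cons, PySem.Set.update_append, update_ofList]

-- the new elements of one A-round, under the BFS invariant: only the frontier contributes
theorem step_new (bags : List (List (String × Int))) (pd : List String)
    (pre fr ns : List String)
    (hpre : ∀ s ∈ pre, ∀ k ∈ find_color s bags pd, k ∈ pre ++ fr)
    (hns : ∀ x ∈ ns, x ∈ pre ++ fr) :
    PySem.Set.diff
        ((pre ++ fr).foldl (fun a s => PySem.Set.update a (PySem.Set.ofList (find_color s bags pd))) ns)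
        (pre ++ fr)
      = (PySem.Set.ofList (fr.flatMap (fun s => find_color s bags pd))).filter
          (fun y => !(PySem.Set.contains (pre ++ fr) y)) := by
  rw [aLoop_fold_update, PySem.Set.update_eq_append_filter]
  have hdiff : ∀ (u : List String), PySem.Set.diff u (pre ++ fr)
      = u.filter (fun y => !(PySem.Set.contains (pre ++ fr) y)) := fun u => rfl
  rw [hdiff, List.filter_append]
  have h1 : ns.filter (fun y => !(PySem.Set.contains (pre ++ fr) y)) = [] := by
    apply List.filter_eq_nil_iff.2
    intro x hx
    rw [containsT (hns x hx)]
    simp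
  rw [h1, List.nil_append, List.filter_filter]
  rw [List.flatMap_append, PySem.Set.ofList_append, PySem.Set.update_eq_append_filter,
    List.filter_append]
  have h2 : (PySem.Set.ofList (pre.flatMap fun s => find_color s bags pd)).filter
      (fun y => !(PySem.Set.contains (pre ++ fr) y) && !(PySem.Set.contains ns y)) = [] := by
    apply List.filter_eq_nil_iff.2
    intro x hx
    have hxm : x ∈ pre ++ fr := by
      rw [PySem.Set.mem_ofList] at hx
      obtain ⟨s, hs, hk⟩ := List.mem_flatMap.1 hx
      exact hpre s hs x hk
    rw [containsT hxm]
    simp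
  rw [h2, List.nil_append, List.filter_filter]
  apply List.filter_congr
  intro x hx
  by_cases hS : x ∈ pre ++ fr
  · rw [containsT hS]
    simp
  · have hP : x ∉ PySem.Set.ofList (pre.flatMap fun s => find_color s bags pd) := by
      rw [PySem.Set.mem_ofList]
      intro hxm
      obtain ⟨s, hs, hk⟩ := List.mem_flatMap.1 hxm
      exact hS (hpre s hs x hk)
    have hN : x ∉ ns := fun h => hS (hns x h)
    rw [containsF hS, containsF hP, containsF hN]
    simp

-- main simulation: with the BFS invariant, A's loop and B's loop agree round for round
theorem loop_eq (bags : List (List (String × Int))) (pd : List String) :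
    ∀ (fuel : Nat) (pre fr ns : List String),
      (pre ++ fr).Nodup →
      (∀ s ∈ pre, ∀ k ∈ find_color s bags pd, k ∈ pre ++ fr) →
      (∀ x ∈ ns, x ∈ pre ++ fr) →
      aLoop bags pd (pre ++ fr) ns fuel = bfsLoop bags pd (pre ++ fr) fr fuel := by
  intro fuel
  induction fuel with
  | zero =>
    intro pre fr ns _ _ _
    cases fr <;> simp [aLoop, bfsLoop]
  | succ fuel ih =>
    intro pre fr ns hnd hpre hns
    have hstep := step_new bags pd pre fr ns hpre hns
    rw [bfs_round, PySem.Set.update_eq_append_filter, List.drop_left]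
    rw [aLoop]
    simp only [hstep]
    set nw := (PySem.Set.ofList (fr.flatMap (fun s => find_color s bags pd))).filter
        (fun y => !(PySem.Set.contains (pre ++ fr) y)) with hnw
    have hnwnd : nw.Nodup := (PySem.Set.nodup_ofList _).filter _
    have hnwS : ∀ x ∈ nw, x ∉ pre ++ fr := by
      intro x hx hxS
      have h := List.of_mem_filter hx
      rw [containsT hxS] at h
      simp at h
    have hnwmem : ∀ x ∈ fr.flatMap (fun s => find_color s bags pd), x ∉ pre ++ fr → x ∈ nw := by
      intro x hx hxS
      rw [hnw]
      refine List.mem_filter.2 ⟨(PySem.Set.mem_ofList _ _).2 hx, ?_⟩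
      simpa using hxS
    by_cases hnil : nw = []
    · rw [hnil]
      simp [bfsLoop]
    · have hlen : 0 < nw.length := List.length_pos_iff.2 hnil
      rw [if_pos hlen, PySem.Set.update_eq_append_of_disjoint _ _ hnwnd hnwS]
      refine ih (pre ++ fr) nw nw ?_ ?_ ?_
      · exact List.Nodup.append hnd hnwnd (fun x hx1 hx2 => hnwS x hx2 hx1)
      · intro s hs k hk
        rcases List.mem_append.1 hs with hsp | hsf
        · exact List.mem_append_left _ (hpre s hsp k hk)
        · by_cases hkS : k ∈ pre ++ fr
          · exact List.mem_append_left _ hkS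
          · exact List.mem_append_right _
              (hnwmem k (List.mem_flatMap.2 ⟨s, hsf, hk⟩) hkS)
      · intro x hx
        exact List.mem_append_right _ hx

-- the equivalence itself (used under either disjunct of Pre_)
theorem find_all_colors_eq_alt (bags : List (List (String × Int))) (pd : List String) :
    find_all_colors bags pd = find_all_colors_alt bags pd := by
  unfold find_all_colors find_all_colors_alt
  have key := loop_eq bags pd ((bags.flatMap (fun b => (PySem.Dict.ofList b).keys)).length + 2)
    [] (PySem.Set.ofList (find_color "shiny gold" bags pd)) []
    (by simpa using PySem.Set.nodup_ofList (find_color "shiny gold" bags pd))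
    (by intro s hs; simp at hs)
    (by intro x hx; simp at hx)
  simp only [List.nil_append] at key
  have h3 : (bags.flatMap (fun b => (PySem.Dict.ofList b).keys)).length + 3
      = ((bags.flatMap (fun b => (PySem.Dict.ofList b).keys)).length + 2) + 1 := rfl
  rw [h3, bfs_round]
  simp only [List.flatMap_cons, List.flatMap_nil, List.append_nil]
  simp only [PySem.Set.empty, PySem.Set.update_nil_left, List.length_nil, List.drop_zero]
  exact key

-- ===== VERDICT (by name: the statement is the Claim_ definition above) =====
theorem find_all_colors_spec : Claim_equal_find_all_colors := by
  unfold Claim_equal_find_all_colors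
  intro bags pd _ hpre
  unfold Spec_find_all_colors
  rcases hpre with h1 | h2
  · exact find_all_colors_eq_alt bags pd
  · exact find_all_colors_eq_alt bags pd
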